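-- pv_equiv track=rewrite | github.com/Caesar2011/tts-chatterbox | src/main.py | _find_potential_splits
-- ===== SOURCE A (Python) =====
-- def _find_potential_splits(text):
--     splits = {0: 'start'}
--     for i in range(1, len(text)):
--         if text[i - 1:i + 1] == '\n\n':
--             splits[i] = 'double_newline'
--         elif text[i - 1] == '\n' and i not in splits:
--             splits[i] = 'single_newline'
--         elif text[i - 1] in '.!?' and text[i].isspace() and i not in splits:
--             splits[i] = 'sentence_end'
--         elif text[i - 1].isspace() and not text[i].isspace() and i not in splits:
--             splits[i] = 'word_end'
--     splits[len(text)] = 'word_end'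
--     return splits
-- ===== SOURCE B (Python) =====
-- def _find_potential_splits(text):
--     n = len(text)
--     labels = {}
--     # four staged detector scans, in priority order; setdefault lets an
--     # earlier (higher-priority) detector keep its label
--     for i in range(1, n):
--         if text[i - 1] == '\n' and text[i] == '\n':
--             labels.setdefault(i, 'double_newline')
--     for i in range(1, n):
--         if text[i - 1] == '\n':
--             labels.setdefault(i, 'single_newline')
--     for i in range(1, n):
--         if text[i - 1] in '.!?' and text[i].isspace():
--             labels.setdefault(i, 'sentence_end')
--     for i in range(1, n):
--         if text[i - 1].isspace() and not text[i].isspace():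
--             labels.setdefault(i, 'word_end')
--     splits = {0: 'start'}
--     for i in sorted(labels):
--         splits[i] = labels[i]
--     splits[n] = 'word_end'
--     return splits
-- ===== Notes on version B (the rewrite author's own statement) =====
-- stated objective: alternative
-- what changed: Replaces A's single pass with an if/elif priority chain and dict-membership guards by four staged detector scans (one per split type, in priority order, each inserting via setdefault) followed by an ordered assembly over the sorted detected positions.
import Mathlib
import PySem

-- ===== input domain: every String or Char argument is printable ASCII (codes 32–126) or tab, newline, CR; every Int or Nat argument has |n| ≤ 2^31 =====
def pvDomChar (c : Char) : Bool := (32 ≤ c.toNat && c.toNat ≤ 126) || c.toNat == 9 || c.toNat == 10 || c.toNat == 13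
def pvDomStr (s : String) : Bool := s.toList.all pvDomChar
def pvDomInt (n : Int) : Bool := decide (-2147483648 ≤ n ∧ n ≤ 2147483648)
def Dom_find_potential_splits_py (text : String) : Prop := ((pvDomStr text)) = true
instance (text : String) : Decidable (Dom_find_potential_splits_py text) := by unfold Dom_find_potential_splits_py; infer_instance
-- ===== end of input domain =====

-- B replaces A's one-pass if/elif chain by four staged detector scans (priority via
-- setdefault) plus an ordered assembly over sorted positions: same result, different
-- decomposition (objective: alternative).

-- ===== PORT A =====
-- 1-char membership "text[i-1] in '.!?'" and "text[i-1] == '\n'" are char comparisons (exact).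
def find_potential_splits_py (text : String) : List (Int × String) :=
  let cs := text.toList
  let d0 : PySem.Dict Int String := PySem.Dict.empty.insert 0 "start"
  let dfin := (PySem.List.pyRange 1 (PySem.Str.len text) 1).foldl (fun d i =>
    if PySem.List.slice cs (some (i - 1)) (some (i + 1)) == ['\n', '\n'] then
      d.insert i "double_newline"
    else if (PySem.List.pyGetD cs (i - 1) ' ' == '\n') && !(d.contains i) then
      d.insert i "single_newline"
    else if (PySem.List.pyGetD cs (i - 1) ' ' == '.' || PySem.List.pyGetD cs (i - 1) ' ' == '!'
              || PySem.List.pyGetD cs (i - 1) ' ' == '?')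
            && PySem.Chars.isspace (PySem.List.pyGetD cs i ' ') && !(d.contains i) then
      d.insert i "sentence_end"
    else if PySem.Chars.isspace (PySem.List.pyGetD cs (i - 1) ' ')
            && !(PySem.Chars.isspace (PySem.List.pyGetD cs i ' ')) && !(d.contains i) then
      d.insert i "word_end"
    else d) d0
  (dfin.insert (PySem.Str.len text) "word_end").items

-- ===== PORT B =====
-- the four detector conditions of Source B (in-range indexing text[i-1], text[i] → pyGetD)
def pvCondDN (cs : List Char) (i : Int) : Bool :=
  PySem.List.pyGetD cs (i - 1) ' ' == '\n' && PySem.List.pyGetD cs i ' ' == '\n'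
def pvCondSN (cs : List Char) (i : Int) : Bool :=
  PySem.List.pyGetD cs (i - 1) ' ' == '\n'
def pvCondSE (cs : List Char) (i : Int) : Bool :=
  (PySem.List.pyGetD cs (i - 1) ' ' == '.' || PySem.List.pyGetD cs (i - 1) ' ' == '!'
    || PySem.List.pyGetD cs (i - 1) ' ' == '?')
  && PySem.Chars.isspace (PySem.List.pyGetD cs i ' ')
def pvCondWE (cs : List Char) (i : Int) : Bool :=
  PySem.Chars.isspace (PySem.List.pyGetD cs (i - 1) ' ')
  && !(PySem.Chars.isspace (PySem.List.pyGetD cs i ' '))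

-- one detector scan of Source B: "for i in range(1, n): if C(i): labels.setdefault(i, lbl)"
def pvScan (n : Int) (C : Int → Bool) (lbl : String) (d : PySem.Dict Int String) :
    PySem.Dict Int String :=
  (PySem.List.pyRange 1 n 1).foldl (fun d i => if C i then d.setdefault i lbl else d) d

def find_potential_splits_py_alt (text : String) : List (Int × String) :=
  let cs := text.toList
  let n := PySem.Str.len text
  let labels :=
    pvScan n (pvCondWE cs) "word_end"
      (pvScan n (pvCondSE cs) "sentence_end"
        (pvScan n (pvCondSN cs) "single_newline"
          (pvScan n (pvCondDN cs) "double_newline" PySem.Dict.empty)))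
  let d0 : PySem.Dict Int String := PySem.Dict.empty.insert 0 "start"
  -- "for i in sorted(labels): splits[i] = labels[i]"; labels[i] never raises (i is a key),
  -- so getD with a dummy default is exact here
  let splits := (PySem.List.sorted labels.keys (fun x => x) false).foldl
      (fun d i => d.insert i (labels.getD i "")) d0
  (splits.insert n "word_end").items

-- ===== PRECONDITION & SPEC =====
def Spec_find_potential_splits_py (text : String) (out : List (Int × String)) : Prop := out = find_potential_splits_py_alt text
instance (text : String) (out : List (Int × String)) : Decidable (Spec_find_potential_splits_py text out) := by unfold Spec_find_potential_splits_py; infer_instance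

-- ===== CLAIM (what is proved, stated in full; the proofs are below) =====
def Claim_equal_find_potential_splits_py : Prop := ∀ (text : String), Dom_find_potential_splits_py text → Spec_find_potential_splits_py text (find_potential_splits_py text)

-- ===== LEMMAS AND PROOFS =====

-- A's loop body, as a pure per-position classifier (the membership guards hold: keys are fresh).
def pvLabelA (cs : List Char) (i : Int) : Option String :=
  if PySem.List.slice cs (some (i - 1)) (some (i + 1)) == ['\n', '\n'] then some "double_newline"
  else if PySem.List.pyGetD cs (i - 1) ' ' == '\n' then some "single_newline"
  else if (PySem.List.pyGetD cs (i - 1) ' ' == '.' || PySem.List.pyGetD cs (i - 1) ' ' == '!'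
            || PySem.List.pyGetD cs (i - 1) ' ' == '?')
          && PySem.Chars.isspace (PySem.List.pyGetD cs i ' ') then some "sentence_end"
  else if PySem.Chars.isspace (PySem.List.pyGetD cs (i - 1) ' ')
          && !(PySem.Chars.isspace (PySem.List.pyGetD cs i ' ')) then some "word_end"
  else none

-- a fold that, at each step with a fresh key, either inserts an optional label or leaves d
theorem pv_foldG {α : Type} (l : List α) (keyf : α → Int) (g : α → Option String)
    (body : PySem.Dict Int String → α → PySem.Dict Int String)
    (hb : ∀ (d : PySem.Dict Int String) (x : α), x ∈ l → d.contains (keyf x) = false →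
        body d x = match g x with | some v => d.insert (keyf x) v | none => d) :
    ∀ d : PySem.Dict Int String,
      (∀ x ∈ l, d.contains (keyf x) = false) → (l.map keyf).Nodup →
      (l.foldl body d).items
        = d.items ++ l.filterMap (fun x => (g x).map (fun v => (keyf x, v))) := by
  induction l with
  | nil => intro d _ _; simp
  | cons x t ih =>
    intro d hc hnd
    have hx : d.contains (keyf x) = false := hc x (by simp)
    have hbx := hb d x (by simp) hx
    simp only [List.foldl_cons, hbx]
    have hnd2 : (keyf x :: t.map keyf).Nodup := by simpa using hnd
    have hnd' : (t.map keyf).Nodup := hnd2.of_cons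
    have hxt : keyf x ∉ t.map keyf := (List.nodup_cons.mp hnd2).1
    cases hg : g x with
    | none =>
      rw [ih (fun d x hx hc => hb d x (List.mem_cons_of_mem _ hx) hc) d
            (fun y hy => hc y (List.mem_cons_of_mem _ hy)) hnd']
      simp [hg]
    | some v =>
      have hfresh : ∀ y ∈ t, (d.insert (keyf x) v).contains (keyf y) = false := by
        intro y hy
        rw [PySem.Dict.contains_insert]
        have hne : keyf y ≠ keyf x := by
          intro h; exact hxt (h ▸ List.mem_map_of_mem hy)
        simp [hne, hc y (List.mem_cons_of_mem _ hy)]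
      rw [ih (fun d x hx hc => hb d x (List.mem_cons_of_mem _ hx) hc) _ hfresh hnd',
          PySem.Dict.items_insert_of_not_contains d v hx]
      simp [hg]

theorem pv_bodyA (cs : List Char) (d : PySem.Dict Int String) (i : Int)
    (hc : d.contains i = false) :
    (if PySem.List.slice cs (some (i - 1)) (some (i + 1)) == ['\n', '\n'] then
      d.insert i "double_newline"
    else if (PySem.List.pyGetD cs (i - 1) ' ' == '\n') && !(d.contains i) then
      d.insert i "single_newline"
    else if (PySem.List.pyGetD cs (i - 1) ' ' == '.' || PySem.List.pyGetD cs (i - 1) ' ' == '!'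
              || PySem.List.pyGetD cs (i - 1) ' ' == '?')
            && PySem.Chars.isspace (PySem.List.pyGetD cs i ' ') && !(d.contains i) then
      d.insert i "sentence_end"
    else if PySem.Chars.isspace (PySem.List.pyGetD cs (i - 1) ' ')
            && !(PySem.Chars.isspace (PySem.List.pyGetD cs i ' ')) && !(d.contains i) then
      d.insert i "word_end"
    else d)
    = match pvLabelA cs i with | some v => d.insert i v | none => d := by
  simp only [pvLabelA, hc, Bool.not_false, Bool.and_true]
  split_ifs <;> rfl

-- what one setdefault scan does to a single lookup
theorem pv_scan_get? (l : List Int) (C : Int → Bool) (lbl : String) :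
    ∀ (d : PySem.Dict Int String) (j : Int),
      ((l.foldl (fun d i => if C i then d.setdefault i lbl else d) d).get? j)
        = (d.get? j).or (if j ∈ l ∧ C j then some lbl else none) := by
  induction l with
  | nil => intro d j; simp
  | cons i t ih =>
    intro d j
    simp only [List.foldl_cons]
    rw [ih]
    by_cases hCi : C i
    · simp only [hCi, if_pos]
      by_cases hji : j = i
      · subst hji
        rw [PySem.Dict.get?_setdefault_self d j lbl]
        cases hd : d.get? j <;> simp [hCi, Option.or]
      · rw [PySem.Dict.get?_setdefault_of_ne d lbl hji]
        have : (j ∈ i :: t ∧ C j = true) ↔ (j ∈ t ∧ C j = true) := by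
          constructor
          · rintro ⟨h1, h2⟩; exact ⟨(List.mem_cons.mp h1).resolve_left hji, h2⟩
          · rintro ⟨h1, h2⟩; exact ⟨List.mem_cons_of_mem _ h1, h2⟩
        simp only [this]
    · simp only [hCi, if_neg, Bool.false_eq_true, not_false_iff]
      have : (j ∈ i :: t ∧ C j = true) ↔ (j ∈ t ∧ C j = true) := by
        constructor
        · rintro ⟨h1, h2⟩
          rcases List.mem_cons.mp h1 with rfl | h1'
          · exact absurd h2 (by simpa using hCi)
          · exact ⟨h1', h2⟩
        · rintro ⟨h1, h2⟩; exact ⟨List.mem_cons_of_mem _ h1, h2⟩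
      simp only [this]

-- a setdefault scan keeps keys unique
theorem pv_scan_nodup (l : List Int) (C : Int → Bool) (lbl : String) :
    ∀ (d : PySem.Dict Int String), d.keys.Nodup →
      ((l.foldl (fun d i => if C i then d.setdefault i lbl else d) d).keys).Nodup := by
  induction l with
  | nil => intro d h; simpa using h
  | cons i t ih =>
    intro d h
    simp only [List.foldl_cons]
    apply ih
    by_cases hCi : C i
    · simp only [hCi, if_pos]
      by_cases hc : d.contains i
      · rw [PySem.Dict.setdefault_of_contains d lbl hc]; exact h
      · rw [PySem.Dict.setdefault_of_not_contains d lbl (by simpa using hc)]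
        exact PySem.Dict.nodup_keys_insert d i lbl h
    · simpa [hCi] using h

-- the combined lookup of the four scans is A's classifier (in range), none outside
theorem pv_labels_get? (cs : List Char) (j : Int) :
    ((pvScan (cs.length : Int) (pvCondWE cs) "word_end"
      (pvScan (cs.length : Int) (pvCondSE cs) "sentence_end"
        (pvScan (cs.length : Int) (pvCondSN cs) "single_newline"
          (pvScan (cs.length : Int) (pvCondDN cs) "double_newline" PySem.Dict.empty)))).get? j)
      = if 1 ≤ j ∧ j < (cs.length : Int) then pvLabelA cs j else none := by
  unfold pvScan
  rw [pv_scan_get?, pv_scan_get?, pv_scan_get?, pv_scan_get?]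
  simp only [PySem.Dict.get?_empty, PySem.List.mem_pyRange_one, Option.none_or]
  by_cases hj : 1 ≤ j ∧ j < (cs.length : Int)
  · obtain ⟨h1, h2⟩ := hj
    have hk1 : (j - 1).toNat < cs.length := by omega
    have hk2 : j.toNat < cs.length := by omega
    have hslice : PySem.List.slice cs (some (j - 1)) (some (j + 1))
        = [cs[(j - 1).toNat], cs[j.toNat]] := by
      rw [PySem.List.slice_toNat cs (by omega) (by omega)]
      have ht : (j + 1).toNat - (j - 1).toNat = 2 := by omega
      have hd : List.drop (j - 1).toNat cs
          = cs[(j - 1).toNat] :: cs[j.toNat] :: List.drop (j.toNat + 1) cs := by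
        rw [List.drop_eq_getElem_cons hk1]
        have hkk : (j - 1).toNat + 1 = j.toNat := by omega
        rw [hkk, List.drop_eq_getElem_cons hk2]
      rw [ht, hd]
      rfl
    have hg1 : PySem.List.pyGetD cs (j - 1) ' ' = cs[(j - 1).toNat] :=
      PySem.List.pyGetD_eq_getElem cs ' ' (by omega) (by omega)
    have hg2 : PySem.List.pyGetD cs j ' ' = cs[j.toNat] :=
      PySem.List.pyGetD_eq_getElem cs ' ' (by omega) (by omega)
    have heq1 : (PySem.List.slice cs (some (j - 1)) (some (j + 1)) == ['\n', '\n'])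
        = pvCondDN cs j := by
      rw [hslice]
      simp [pvCondDN, hg1, hg2]
    simp only [pvLabelA, heq1, h1, h2, and_self, true_and, if_pos]
    by_cases c1 : pvCondDN cs j
      <;> by_cases c2 : pvCondSN cs j
      <;> by_cases c3 : pvCondSE cs j
      <;> by_cases c4 : pvCondWE cs j
      <;> simp only [pvCondDN, pvCondSN, pvCondSE, pvCondWE, Bool.and_eq_true, beq_iff_eq,
            Bool.or_eq_true, Bool.not_eq_true'] at c1 c2 c3 c4
      <;> simp_all [pvCondDN, pvCondSN, pvCondSE, pvCondWE, Option.or]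
    split_ifs <;> simp_all
  · simp [hj]

-- filter+lookup = filterMap (bridge between B's assembly and A's filterMap)
theorem pv_filter_map_eq (l : List Int) (F : Int → Option String) (G : Int → String)
    (h : ∀ i ∈ l, ∀ v, F i = some v → G i = v) :
    (l.filter (fun i => (F i).isSome)).map (fun i => (i, G i))
      = l.filterMap (fun i => (F i).map (fun v => (i, v))) := by
  induction l with
  | nil => simp
  | cons i t ih =>
    have ht := ih (fun x hx v hv => h x (List.mem_cons_of_mem _ hx) v hv)
    cases hF : F i with
    | none => simp [hF, ht]
    | some v =>
      simp only [List.filter_cons, List.filterMap_cons, hF, Option.isSome_some, List.map_cons, ht,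
        Option.map_some, if_pos]
      rw [h i (by simp) v hF]

-- ===== VERDICT (by name: the statement is the Claim_ definition above) =====
theorem find_potential_splits_py_spec : Claim_equal_find_potential_splits_py := by
  intro text _
  unfold Spec_find_potential_splits_py
  show find_potential_splits_py text = find_potential_splits_py_alt text
  simp only [find_potential_splits_py, find_potential_splits_py_alt]
  set cs := text.toList with hcs
  have hlen : PySem.Str.len text = (cs.length : Int) := by rw [hcs]; simp
  rw [hlen]
  set L := pvScan (cs.length : Int) (pvCondWE cs) "word_end"
      (pvScan (cs.length : Int) (pvCondSE cs) "sentence_end"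
        (pvScan (cs.length : Int) (pvCondSN cs) "single_newline"
          (pvScan (cs.length : Int) (pvCondDN cs) "double_newline" PySem.Dict.empty))) with hLdef
  set d0 : PySem.Dict Int String := PySem.Dict.empty.insert 0 "start" with hd0
  set rng := PySem.List.pyRange 1 (cs.length : Int) 1 with hrng
  set fl := rng.filter (fun i => (pvLabelA cs i).isSome) with hfl
  have hgetL : ∀ j : Int, L.get? j
      = if 1 ≤ j ∧ j < (cs.length : Int) then pvLabelA cs j else none := by
    intro j; rw [hLdef, hrng] at *; exact pv_labels_get? cs j
  have hLnodup : L.keys.Nodup := by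
    rw [hLdef]
    unfold pvScan
    apply pv_scan_nodup
    apply pv_scan_nodup
    apply pv_scan_nodup
    apply pv_scan_nodup
    decide
  have hd0fresh : ∀ i : Int, 1 ≤ i → d0.contains i = false := by
    intro i hi
    rw [hd0, PySem.Dict.contains_insert]
    have : i ≠ 0 := by omega
    simp [this, PySem.Dict.contains_empty]
  have hflmem : ∀ a : Int, a ∈ fl → 1 ≤ a ∧ a < (cs.length : Int) := by
    intro a ha
    rw [hfl] at ha
    exact PySem.List.mem_pyRange_one.mp (hrng ▸ (List.mem_filter.mp ha).1)
  have hflnodup : fl.Nodup := by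
    rw [hfl, hrng]
    exact (PySem.List.nodup_pyRange_one 1 (cs.length : Int)).filter _
  -- sorted(labels) is the in-order list of labelled positions
  have hks : PySem.List.sorted L.keys (fun x => x) false = fl := by
    apply PySem.List.sorted_eq_of_perm_of_pairwise_lt
    · rw [List.perm_ext_iff_of_nodup hflnodup hLnodup]
      intro a
      rw [← PySem.Dict.contains_iff_mem_keys, PySem.Dict.contains_eq_isSome_get?, hgetL a]
      rw [hfl, List.mem_filter, hrng, PySem.List.mem_pyRange_one]
      by_cases ha : 1 ≤ a ∧ a < (cs.length : Int) <;> simp [ha]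
    · rw [hfl, hrng]
      exact (PySem.List.pairwise_lt_pyRange_one 1 (cs.length : Int)).filter _
  -- the value stored at a labelled position is A's label there
  have hval : ∀ i ∈ rng, ∀ v, pvLabelA cs i = some v → L.getD i "" = v := by
    intro i hi v hv
    have hi' := PySem.List.mem_pyRange_one.mp (hrng ▸ hi)
    have hg : L.get? i = some v := by rw [hgetL i]; simp [hi', hv]
    exact PySem.Dict.getD_of_mem_items L (PySem.Dict.mem_items_of_get?_eq_some L hg) hLnodup ""
  -- A's fold appends one labelled pair per position, in index order
  have hA := pv_foldG rng (fun i => i) (fun i => pvLabelA cs i)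
      (fun d i =>
        if PySem.List.slice cs (some (i - 1)) (some (i + 1)) == ['\n', '\n'] then
          d.insert i "double_newline"
        else if (PySem.List.pyGetD cs (i - 1) ' ' == '\n') && !(d.contains i) then
          d.insert i "single_newline"
        else if (PySem.List.pyGetD cs (i - 1) ' ' == '.' || PySem.List.pyGetD cs (i - 1) ' ' == '!'
                  || PySem.List.pyGetD cs (i - 1) ' ' == '?')
                && PySem.Chars.isspace (PySem.List.pyGetD cs i ' ') && !(d.contains i) then
          d.insert i "sentence_end"
        else if PySem.Chars.isspace (PySem.List.pyGetD cs (i - 1) ' ')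
                && !(PySem.Chars.isspace (PySem.List.pyGetD cs i ' ')) && !(d.contains i) then
          d.insert i "word_end"
        else d)
      (fun d i _ hc => pv_bodyA cs d i hc) d0
      (fun i hi => hd0fresh i (PySem.List.mem_pyRange_one.mp (hrng ▸ hi)).1)
      (by rw [hrng]; simpa using PySem.List.nodup_pyRange_one 1 (cs.length : Int))
  -- B's assembly fold appends the same pairs (fresh, strictly increasing keys)
  have hB := PySem.Dict.items_foldl_insert_fresh fl (fun i => i) (fun i => L.getD i "") d0
      (fun a ha => hd0fresh a (hflmem a ha).1)
      (by simpa using hflnodup)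
  have hlists : rng.filterMap (fun i => (pvLabelA cs i).map (fun v => (i, v)))
      = fl.map (fun i => (i, L.getD i "")) := by
    rw [hfl, ← pv_filter_map_eq rng (pvLabelA cs) (fun i => L.getD i "") hval]
  have hdicts :
      (rng.foldl (fun d i =>
        if PySem.List.slice cs (some (i - 1)) (some (i + 1)) == ['\n', '\n'] then
          d.insert i "double_newline"
        else if (PySem.List.pyGetD cs (i - 1) ' ' == '\n') && !(d.contains i) then
          d.insert i "single_newline"
        else if (PySem.List.pyGetD cs (i - 1) ' ' == '.' || PySem.List.pyGetD cs (i - 1) ' ' == '!'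
                  || PySem.List.pyGetD cs (i - 1) ' ' == '?')
                && PySem.Chars.isspace (PySem.List.pyGetD cs i ' ') && !(d.contains i) then
          d.insert i "sentence_end"
        else if PySem.Chars.isspace (PySem.List.pyGetD cs (i - 1) ' ')
                && !(PySem.Chars.isspace (PySem.List.pyGetD cs i ' ')) && !(d.contains i) then
          d.insert i "word_end"
        else d) d0)
      = ((PySem.List.sorted L.keys (fun x => x) false).foldl
          (fun d i => d.insert i (L.getD i "")) d0) := by
    apply PySem.Dict.ext
    rw [hA, hks, hB, hlists]
  rw [hdicts]
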